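-- pv_equiv track=rewrite | github.com/Jkeyuk/Projects | Systematic_Program_Design/self-referential.py | hasMapleLeafs
-- ===== SOURCE A (Python) =====
-- def hasMapleLeafs(l):
--     if not l:
--         return False
--     else:
--         if l[0] == 'maple leafs':
--             return True
--         else:
--             return hasMapleLeafs(l[1:])
-- ===== SOURCE B (Python) =====
-- def hasMapleLeafs(l):
--     found = False
--     for x in l:
--         found = found or x == 'maple leafs'
--     return found
-- ===== Notes on version B (the rewrite author's own statement) =====
-- stated objective: faster
-- what changed: Replaced tail recursion over list slices (each step copying l[1:]) by a single iterative pass accumulating a boolean flag.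
import Mathlib
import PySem

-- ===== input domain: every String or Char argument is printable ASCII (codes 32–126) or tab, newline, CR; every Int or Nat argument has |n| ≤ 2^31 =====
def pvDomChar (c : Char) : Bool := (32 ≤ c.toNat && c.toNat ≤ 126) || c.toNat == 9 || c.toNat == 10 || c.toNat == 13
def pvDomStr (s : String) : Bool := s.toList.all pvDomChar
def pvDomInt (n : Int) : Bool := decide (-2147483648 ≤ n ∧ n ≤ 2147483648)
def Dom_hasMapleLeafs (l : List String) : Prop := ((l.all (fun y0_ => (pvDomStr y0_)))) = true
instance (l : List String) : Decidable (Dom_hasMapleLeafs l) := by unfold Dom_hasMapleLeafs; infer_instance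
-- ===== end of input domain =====

-- B replaces A's tail recursion over slices with one iterative pass over the list
-- accumulating a boolean flag, avoiding the per-step slice copy (objective: faster, measured).

-- ===== PORT A =====
-- A: if not l: False; elif l[0] == 'maple leafs': True; else recurse on l[1:]
def hasMapleLeafs (l : List String) : Bool :=
  if l = [] then false
  else if PySem.List.pyGetD l 0 "" = "maple leafs" then true
  else hasMapleLeafs (PySem.List.slice l (some 1) none)
termination_by l.length
decreasing_by
  rw [PySem.List.slice_from_one]
  cases l with
  | nil => simp_all
  | cons x xs => simp

-- ===== PORT B =====
-- B: found = False; for x in l: found = found or x == 'maple leafs'; return found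
def hasMapleLeafs_alt (l : List String) : Bool :=
  l.foldl (fun found x => found || (x == "maple leafs")) false

-- ===== PRECONDITION & SPEC =====
def Spec_hasMapleLeafs (l : List String) (out : Bool) : Prop := out = hasMapleLeafs_alt l
instance (l : List String) (out : Bool) : Decidable (Spec_hasMapleLeafs l out) := by unfold Spec_hasMapleLeafs; infer_instance

-- ===== CLAIM (what is proved, stated in full; the proofs are below) =====
def Claim_equal_hasMapleLeafs : Prop := ∀ (l : List String), Dom_hasMapleLeafs l → Spec_hasMapleLeafs l (hasMapleLeafs l)

-- ===== LEMMAS AND PROOFS =====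

-- B's fold with an initial flag b equals b || any-match.
lemma alt_foldl_or (l : List String) (b : Bool) :
    l.foldl (fun found x => found || (x == "maple leafs")) b
      = (b || l.any (fun x => x == "maple leafs")) := by
  induction l generalizing b with
  | nil => simp
  | cons x xs ih => simp [List.foldl, List.any, ih, Bool.or_assoc]

lemma portA_eq_any (l : List String) :
    hasMapleLeafs l = l.any (fun x => x == "maple leafs") := by
  induction l with
  | nil => simp [hasMapleLeafs]
  | cons x xs ih =>
    rw [hasMapleLeafs]
    rw [PySem.List.slice_from_one]
    simp [PySem.List.pyGetD, PySem.List.pyGet?, PySem.List.pyIdx?, ih]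
    by_cases h : x = "maple leafs" <;> simp [h]

-- ===== VERDICT (by name: the statement is the Claim_ definition above) =====
theorem hasMapleLeafs_spec : Claim_equal_hasMapleLeafs := by
  intro l _
  unfold Spec_hasMapleLeafs hasMapleLeafs_alt
  rw [portA_eq_any, alt_foldl_or]
  simp
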